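-- pv_equiv track=rewrite | github.com/samirg1/wordle | nerdle.py | findMutuallyExclusiveStrings
-- ===== SOURCE A (Python) =====
-- EQUALS_SIGN: str = '='
--
-- def findMutuallyExclusiveStrings(allStrings: list) -> list:
--     pairs = []
--     for i in range(len(allStrings)):
--         word1 = allStrings[i]
--         for j in range(i, len(allStrings)):
--             word2 = allStrings[j]
--             if mutuallyExclusive(word1, word2):
--                 pairs.append((word1, word2))
--     return pairs
--
-- def mutuallyExclusive(s1: str, s2: str) -> bool:
--     dic = dict([(c, True) for c in s1])
--     for c in s2:
--         try:
--             if dic[c] and c != EQUALS_SIGN: # both strings must have an equals sign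
--                 return False
--         except KeyError:
--             continue
--     return True
-- ===== SOURCE B (Python) =====
-- EQUALS_SIGN: str = '='
--
-- def findMutuallyExclusiveStrings(allStrings: list) -> list:
--     # inverted index: char (except '=') -> set of indices of strings containing it
--     index = {}
--     for idx, s in enumerate(allStrings):
--         for c in s:
--             if c != EQUALS_SIGN:
--                 index.setdefault(c, set()).add(idx)
--     pairs = []
--     for i, word1 in enumerate(allStrings):
--         conflicts = set()
--         for c in word1:
--             if c != EQUALS_SIGN:
--                 conflicts |= index.get(c, set())
--         for j in range(i, len(allStrings)):
--             if j not in conflicts: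
--                 pairs.append((word1, allStrings[j]))
--     return pairs
-- ===== Notes on version B (the rewrite author's own statement) =====
-- stated objective: faster
-- what changed: Replaces the per-pair dict-build-and-scan character comparison with a precomputed inverted index (char -> set of string indices) and a per-string conflict set, emitting each pair by a set-membership test instead of re-scanning both strings.
import Mathlib
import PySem

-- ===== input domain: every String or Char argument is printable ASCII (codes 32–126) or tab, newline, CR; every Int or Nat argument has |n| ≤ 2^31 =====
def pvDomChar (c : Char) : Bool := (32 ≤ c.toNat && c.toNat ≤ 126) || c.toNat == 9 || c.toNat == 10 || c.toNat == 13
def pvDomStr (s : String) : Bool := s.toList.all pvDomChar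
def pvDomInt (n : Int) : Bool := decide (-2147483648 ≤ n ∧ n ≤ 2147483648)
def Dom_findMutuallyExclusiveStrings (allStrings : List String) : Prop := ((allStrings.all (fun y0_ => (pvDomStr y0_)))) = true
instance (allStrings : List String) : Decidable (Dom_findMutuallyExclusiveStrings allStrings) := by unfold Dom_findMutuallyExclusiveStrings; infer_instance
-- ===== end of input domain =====

-- B replaces A's per-pair character scan by an inverted index (char -> set of string indices)
-- plus a per-string conflict set; measured faster on the generated inputs.


-- ===== PORT A =====
-- helper mutuallyExclusive: dict of s1's chars, then scan s2 (KeyError ⇒ continue)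
def meLoop (dic : PySem.Dict Char Bool) : List Char → Bool
  | [] => true
  | c :: rest =>
    match dic.get? c with
    | some b => if b && !(c == '=') then false else meLoop dic rest
    | none => meLoop dic rest

def mutuallyExclusive (s1 s2 : String) : Bool :=
  let dic := s1.toList.foldl (fun d c => d.insert c true) PySem.Dict.empty
  meLoop dic s2.toList

def findMutuallyExclusiveStrings (allStrings : List String) : List (String × String) :=
  (PySem.List.pyRange 0 (allStrings.length : Int)).foldl (fun pairs i =>
    let word1 := PySem.List.pyGetD allStrings i ""
    (PySem.List.pyRange i (allStrings.length : Int)).foldl (fun pairs j =>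
      let word2 := PySem.List.pyGetD allStrings j ""
      if mutuallyExclusive word1 word2 then pairs ++ [(word1, word2)] else pairs) pairs) []

-- ===== PORT B =====
-- inverted index: char (except '=') -> set of indices of strings containing it
def buildIndex (allStrings : List String) : PySem.Dict Char (PySem.Set Int) :=
  (PySem.List.enumerate allStrings).foldl (fun d p =>
    p.2.toList.foldl (fun d c =>
      if c ≠ '=' then d.insert c ((d.getD c PySem.Set.empty).add p.1) else d) d)
    PySem.Dict.empty

def conflictsOf (index : PySem.Dict Char (PySem.Set Int)) (w : String) : PySem.Set Int :=
  w.toList.foldl (fun s c =>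
    if c ≠ '=' then s.union (index.getD c PySem.Set.empty) else s) PySem.Set.empty

def findMutuallyExclusiveStrings_alt (allStrings : List String) : List (String × String) :=
  let index := buildIndex allStrings
  (PySem.List.enumerate allStrings).foldl (fun pairs p =>
    let conflicts := conflictsOf index p.2
    (PySem.List.pyRange p.1 (allStrings.length : Int)).foldl (fun pairs j =>
      if !(conflicts.contains j) then pairs ++ [(p.2, PySem.List.pyGetD allStrings j "")] else pairs)
      pairs) []

-- ===== PRECONDITION & SPEC =====
def Spec_findMutuallyExclusiveStrings (allStrings : List String) (out : List (String × String)) : Prop := out = findMutuallyExclusiveStrings_alt allStrings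
instance (allStrings : List String) (out : List (String × String)) : Decidable (Spec_findMutuallyExclusiveStrings allStrings out) := by unfold Spec_findMutuallyExclusiveStrings; infer_instance

-- ===== CLAIM (what is proved, stated in full; the proofs are below) =====
def Claim_equal_findMutuallyExclusiveStrings : Prop := ∀ (allStrings : List String), Dom_findMutuallyExclusiveStrings allStrings → Spec_findMutuallyExclusiveStrings allStrings (findMutuallyExclusiveStrings allStrings)

-- ===== LEMMAS AND PROOFS =====

-- A's dict of s1's chars: lookup is membership
theorem get?_charDict (l : List Char) (d : PySem.Dict Char Bool) (c : Char) :
    (l.foldl (fun d c => d.insert c true) d).get? c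
      = if c ∈ l then some true else d.get? c := by
  induction l generalizing d with
  | nil => simp
  | cons a t ih =>
    simp only [List.foldl_cons, ih, List.mem_cons]
    by_cases hc : c = a
    · subst hc; simp [PySem.Dict.get?_insert_self]
    · simp [hc, PySem.Dict.get?_insert_of_ne d true hc]

-- A's scan of s2: true iff no shared non-'=' character
theorem meLoop_iff (s1 : String) (l : List Char) :
    meLoop (s1.toList.foldl (fun d c => d.insert c true) PySem.Dict.empty) l = true
      ↔ ∀ c ∈ l, c ∈ s1.toList → c = '=' := by
  induction l with
  | nil => simp [meLoop]
  | cons a t ih =>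
    rw [meLoop]
    rw [get?_charDict]
    by_cases ha : a ∈ s1.toList
    · simp only [ha, if_pos]
      by_cases he : a = '='
      · subst he; simp [ih]
      · have hc : (true && !(a == '=')) = true := by simp [he]
        simp only [hc, if_pos]
        constructor
        · intro h; exact absurd h Bool.false_ne_true
        · intro h; exact absurd (h a (by simp) ha) he
    · simp [ha, ih, PySem.Dict.get?_empty]

-- inner fold of buildIndex (one string, index k)
theorem mem_getD_charFold (cs : List Char) (d : PySem.Dict Char (PySem.Set Int)) (k j : Int) (c' : Char) :
    j ∈ (cs.foldl (fun d c => if c ≠ '=' then d.insert c ((d.getD c PySem.Set.empty).add k) else d) d).getD c' PySem.Set.empty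
      ↔ (c' ∈ cs ∧ c' ≠ '=' ∧ j = k) ∨ j ∈ d.getD c' PySem.Set.empty := by
  induction cs generalizing d with
  | nil => simp
  | cons a t ih =>
    rw [List.foldl_cons]
    by_cases he : a = '='
    · rw [if_neg (by simp [he]), ih]
      subst he
      simp only [List.mem_cons]
      constructor
      · tauto
      · rintro (⟨hm | hm, hne, hj⟩ | h) <;> tauto
    · rw [if_pos he, ih, PySem.Dict.getD_insert]
      by_cases hc : c' = a
      · subst hc
        rw [if_pos rfl]
        simp only [PySem.Set.mem_add, List.mem_cons]
        constructor
        · rintro (⟨hm, hne, hj⟩ | h | h) <;> tauto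
        · rintro (⟨hm, hne, hj⟩ | h) <;> tauto
      · rw [if_neg hc]
        simp only [List.mem_cons]
        constructor
        · tauto
        · rintro (⟨hm | hm, hne, hj⟩ | h) <;> tauto

-- outer fold of buildIndex over any pair list
theorem mem_getD_pairFold (P : List (Int × String)) (d : PySem.Dict Char (PySem.Set Int)) (j : Int) (c' : Char) :
    j ∈ (P.foldl (fun d p => p.2.toList.foldl (fun d c => if c ≠ '=' then d.insert c ((d.getD c PySem.Set.empty).add p.1) else d) d) d).getD c' PySem.Set.empty
      ↔ (∃ p ∈ P, c' ∈ p.2.toList ∧ c' ≠ '=' ∧ j = p.1) ∨ j ∈ d.getD c' PySem.Set.empty := by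
  induction P generalizing d with
  | nil => simp
  | cons p t ih =>
    rw [List.foldl_cons, ih, mem_getD_charFold]
    simp only [List.mem_cons]
    constructor
    · rintro (⟨q, hq, h⟩ | ⟨hm, hne, hj⟩ | h)
      · exact Or.inl ⟨q, Or.inr hq, h⟩
      · exact Or.inl ⟨p, Or.inl rfl, hm, hne, hj⟩
      · exact Or.inr h
    · rintro (⟨q, hq | hq, h⟩ | h)
      · subst hq; exact Or.inr (Or.inl h)
      · exact Or.inl ⟨q, hq, h⟩
      · exact Or.inr (Or.inr h)

theorem enumerate_eq_map_range (L : List String) (s : Int) :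
    PySem.List.enumerate L s = (List.range L.length).map (fun (k : Nat) => ((s + (k : Int) : Int), L.getD k "")) := by
  induction L generalizing s with
  | nil => simp [PySem.List.enumerate]
  | cons a t ih =>
    rw [PySem.List.enumerate, ih]
    simp only [List.length_cons, List.range_succ_eq_map, List.map_cons, List.map_map]
    refine congrArg₂ List.cons (by simp) ?_
    apply List.map_congr_left
    intro k hk
    simp only [Function.comp_apply, List.getD_cons_succ]
    congr 1
    push_cast
    ring

theorem mem_buildIndex (L : List String) (j : Int) (c' : Char) :
    j ∈ (buildIndex L).getD c' PySem.Set.empty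
      ↔ c' ≠ '=' ∧ ∃ k : Nat, k < L.length ∧ j = (k : Int) ∧ c' ∈ (L.getD k "").toList := by
  rw [buildIndex, mem_getD_pairFold, enumerate_eq_map_range]
  simp only [List.mem_map, List.mem_range, PySem.Dict.getD, PySem.Dict.get?_empty, Option.getD_none]
  constructor
  · rintro (⟨p, ⟨k, hk, rfl⟩, hm, hne, hj⟩ | h)
    · exact ⟨hne, k, hk, by simpa using hj, hm⟩
    · simp [PySem.Set.empty] at h
  · rintro ⟨hne, k, hk, hj, hm⟩
    exact Or.inl ⟨((k : Int), L.getD k ""), ⟨k, hk, by simp⟩, hm, hne, by simpa using hj⟩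

theorem mem_conflictsOf (idx : PySem.Dict Char (PySem.Set Int)) (w : String) (j : Int) :
    j ∈ conflictsOf idx w ↔ ∃ c ∈ w.toList, c ≠ '=' ∧ j ∈ idx.getD c PySem.Set.empty := by
  rw [conflictsOf]
  suffices h : ∀ (cs : List Char) (acc : PySem.Set Int),
      j ∈ cs.foldl (fun s c => if c ≠ '=' then s.union (idx.getD c PySem.Set.empty) else s) acc
        ↔ (∃ c ∈ cs, c ≠ '=' ∧ j ∈ idx.getD c PySem.Set.empty) ∨ j ∈ acc by
    rw [h]; simp [PySem.Set.empty]
  intro cs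
  induction cs with
  | nil => simp
  | cons a t ih =>
    intro acc
    rw [List.foldl_cons]
    by_cases he : a = '='
    · rw [if_neg (by simp [he]), ih]
      subst he
      constructor
      · rintro (⟨c, hc, h⟩ | h)
        · exact Or.inl ⟨c, List.mem_cons_of_mem _ hc, h⟩
        · exact Or.inr h
      · rintro (⟨c, hc, h⟩ | h)
        · rcases List.mem_cons.1 hc with rfl | hc
          · exact absurd rfl h.1
          · exact Or.inl ⟨c, hc, h⟩
        · exact Or.inr h
    · rw [if_pos he, ih]
      simp only [PySem.Set.mem_union]
      constructor
      · rintro (⟨c, hc, h⟩ | h | h)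
        · exact Or.inl ⟨c, List.mem_cons_of_mem _ hc, h⟩
        · exact Or.inr h
        · exact Or.inl ⟨a, List.mem_cons_self, he, h⟩
      · rintro (⟨c, hc, h⟩ | h)
        · rcases List.mem_cons.1 hc with rfl | hc
          · exact Or.inr (Or.inr h.2)
          · exact Or.inl ⟨c, hc, h⟩
        · exact Or.inr (Or.inl h)

-- the per-pair conditions coincide for an in-range j
theorem cond_eq (L : List String) (w : String) (j : Int) (h0 : 0 ≤ j) (hj : j < (L.length : Int)) :
    (!(conflictsOf (buildIndex L) w).contains j) = mutuallyExclusive w (PySem.List.pyGetD L j "") := by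
  have hjn : j = ((j.toNat : Nat) : Int) := by omega
  have hw2 : PySem.List.pyGetD L j "" = L.getD j.toNat "" := by
    have h := PySem.List.pyGetD_natCast L j.toNat ""
    rw [← hjn] at h
    exact h
  have h1 : (conflictsOf (buildIndex L) w).contains j = true
      ↔ ∃ c ∈ w.toList, c ≠ '=' ∧ c ∈ (L.getD j.toNat "").toList := by
    rw [PySem.Set.contains_iff, mem_conflictsOf]
    constructor
    · rintro ⟨c, hc, hne, h⟩
      rw [mem_buildIndex] at h
      obtain ⟨-, k, hk, hjk, hm⟩ := h
      have : j.toNat = k := by omega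
      exact ⟨c, hc, hne, this ▸ hm⟩
    · rintro ⟨c, hc, hne, hm⟩
      refine ⟨c, hc, hne, ?_⟩
      rw [mem_buildIndex]
      exact ⟨hne, j.toNat, by omega, hjn, hm⟩
  rw [Bool.eq_iff_iff, hw2]
  rw [mutuallyExclusive, meLoop_iff]
  rw [Bool.not_eq_true', Bool.eq_false_iff, ne_eq, h1]
  push Not
  constructor
  · intro h c hc2 hcw
    by_contra hne
    exact h c hcw hne hc2
  · intro h c hcw hne hc2
    exact hne (h c hc2 hcw)

-- ===== VERDICT (by name: the statement is the Claim_ definition above) =====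
theorem findMutuallyExclusiveStrings_spec : Claim_equal_findMutuallyExclusiveStrings := by
  intro L _
  unfold Spec_findMutuallyExclusiveStrings
  have hA : findMutuallyExclusiveStrings L
      = (PySem.List.pyRange 0 (L.length : Int)).flatMap (fun i =>
          ((PySem.List.pyRange i (L.length : Int)).filter (fun j =>
            mutuallyExclusive (PySem.List.pyGetD L i "") (PySem.List.pyGetD L j ""))).map (fun j =>
              (PySem.List.pyGetD L i "", PySem.List.pyGetD L j ""))) := by
    rw [findMutuallyExclusiveStrings]
    rw [PySem.List.foldl_congr_mem _ _
      (fun pairs i => pairs ++ ((PySem.List.pyRange i (L.length : Int)).filter (fun j =>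
        mutuallyExclusive (PySem.List.pyGetD L i "") (PySem.List.pyGetD L j ""))).map (fun j =>
          (PySem.List.pyGetD L i "", PySem.List.pyGetD L j ""))) _
      (fun acc i _ => PySem.List.foldl_append_if _ _ _ _)]
    rw [PySem.List.foldl_append_eq_flatMap]
    simp
  have hB : findMutuallyExclusiveStrings_alt L
      = (PySem.List.enumerate L).flatMap (fun p =>
          ((PySem.List.pyRange p.1 (L.length : Int)).filter (fun j =>
            !(conflictsOf (buildIndex L) p.2).contains j)).map (fun j =>
              (p.2, PySem.List.pyGetD L j ""))) := by
    simp only [findMutuallyExclusiveStrings_alt]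
    rw [PySem.List.foldl_congr_mem _ _
      (fun pairs (p : Int × String) => pairs ++ ((PySem.List.pyRange p.1 (L.length : Int)).filter (fun j =>
        !(conflictsOf (buildIndex L) p.2).contains j)).map (fun j =>
          (p.2, PySem.List.pyGetD L j ""))) _
      (fun acc p _ => PySem.List.foldl_append_if _ _ _ _)]
    rw [PySem.List.foldl_append_eq_flatMap]
    simp
  rw [hA, hB, enumerate_eq_map_range L 0, PySem.List.pyRange_zero_natCast, List.flatMap_map, List.flatMap_map]
  apply List.flatMap_congr
  intro k hk
  rw [List.mem_range] at hk
  have hw1 : PySem.List.pyGetD L (k : Int) "" = L.getD k "" := PySem.List.pyGetD_natCast L k ""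
  simp only [zero_add, hw1]
  congr 1
  apply List.filter_congr
  intro j hj
  rw [PySem.List.mem_pyRange_one] at hj
  exact (cond_eq L (L.getD k "") j (by omega) hj.2).symm
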